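-- pv_equiv track=rewrite | github.com/CheneyW/IR | lab2/answer_span_selection/crf_train.py | get_label
-- ===== SOURCE A (Python) =====
-- def get_label(sent_seg, ans_seg):
--     """
--     :param sent_seg: 分词后的答案句
--     :param ans_seg: 分词后的答案
--     :return: 答案句中作为答案的索引
--     """
--     sent, ans = ''.join(sent_seg), ''.join(ans_seg)
--     ans_idx = []
--     if ans in sent:
--         begin = sent.index(ans)
--         end = begin + len(ans) - 1
--
--         pos = [[0, 0] for _ in range(len(sent_seg))]
--         for idx, word in enumerate(sent_seg):
--             pos[idx][1] = pos[idx][0] + len(word) - 1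
--             if idx + 1 < len(pos):
--                 pos[idx + 1][0] = pos[idx][0] + len(word)
--
--         for idx, p in enumerate(pos):
--             if begin <= p[1] and p[0] <= end:
--                 ans_idx.append(idx)
--     else:
--         for idx, word in enumerate(sent_seg):
--             if word in ans_seg:
--                 ans_idx.append(idx)
--     return ans_idx
-- ===== SOURCE B (Python) =====
-- def get_label(sent_seg, ans_seg):
--     """
--     :param sent_seg: segmented answer sentence
--     :param ans_seg: segmented answer
--     :return: indices of words in the sentence that overlap the answer
--     Instead of building a per-word span table and testing every word against
--     the answer span (A), we exploit that the selected words form a contiguous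
--     block: one pass over cumulative character lengths counts how many words
--     end at or before `begin` (the first selected index) and how many words
--     start at or before `end` (one past the last selected index), and the
--     result is just that range.
--     """
--     sent, ans = ''.join(sent_seg), ''.join(ans_seg)
--     if ans in sent:
--         begin = sent.index(ans)
--         end = begin + len(ans) - 1
--         first, last, c = 0, -1, 0
--         for w in sent_seg:
--             if c <= end:          # this word starts inside/before the span
--                 last += 1
--             c += len(w)
--             if c <= begin:        # this word ends before the span starts
--                 first += 1
--         return list(range(first, last + 1))
--     else:
--         return [i for i, w in enumerate(sent_seg) if w in ans_seg]
-- ===== Notes on version B (the rewrite author's own statement) =====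
-- stated objective: alternative
-- what changed: Replaces A's build-a-per-word-span-table-then-test-every-word strategy by a single cumulative-length pass that counts the two boundaries of the (provably contiguous) selected block and returns list(range(first, last+1)); the else branch becomes a comprehension.
import Mathlib
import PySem

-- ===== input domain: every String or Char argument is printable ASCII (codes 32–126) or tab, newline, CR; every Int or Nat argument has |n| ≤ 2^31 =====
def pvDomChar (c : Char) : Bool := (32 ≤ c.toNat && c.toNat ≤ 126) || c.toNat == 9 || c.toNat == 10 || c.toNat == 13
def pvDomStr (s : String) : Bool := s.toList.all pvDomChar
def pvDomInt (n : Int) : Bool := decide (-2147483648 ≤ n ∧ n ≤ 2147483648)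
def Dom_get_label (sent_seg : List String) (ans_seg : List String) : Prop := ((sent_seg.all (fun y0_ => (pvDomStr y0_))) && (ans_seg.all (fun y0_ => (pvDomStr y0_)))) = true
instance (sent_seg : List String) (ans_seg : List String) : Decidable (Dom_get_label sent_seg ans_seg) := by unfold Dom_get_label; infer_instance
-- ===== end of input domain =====

-- B replaces A's span-table-then-filter strategy by a one-pass boundary count
-- (the selected words form a contiguous range); same results, similar cost (alternative).


-- ===== PORT A =====
-- Python builds `pos` as a preallocated list written in place (pos[idx][1] := start+len-1;
-- pos[idx+1][0] := start+len); ported exactly as a fold accumulating the same table in order.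
def get_label (sent_seg : List String) (ans_seg : List String) : List Int :=
  let sent := PySem.Str.join "" sent_seg
  let ans := PySem.Str.join "" ans_seg
  if PySem.Str.isIn ans sent then
    let begin_ := PySem.Str.find sent ans
    let end_ := begin_ + PySem.Str.len ans - 1
    let pos := (sent_seg.foldl (fun (st : Int × List (Int × Int)) w =>
        (st.1 + PySem.Str.len w, st.2 ++ [(st.1, st.1 + PySem.Str.len w - 1)])) (0, [])).2
    (PySem.List.enumerate pos 0).foldl (fun acc ip =>
        if begin_ ≤ ip.2.2 ∧ ip.2.1 ≤ end_ then acc ++ [ip.1] else acc) []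
  else
    (PySem.List.enumerate sent_seg 0).foldl (fun acc iw =>
        if ans_seg.contains iw.2 then acc ++ [iw.1] else acc) []

-- ===== PORT B =====
def get_label_alt (sent_seg : List String) (ans_seg : List String) : List Int :=
  let sent := PySem.Str.join "" sent_seg
  let ans := PySem.Str.join "" ans_seg
  if PySem.Str.isIn ans sent then
    let begin_ := PySem.Str.find sent ans
    let end_ := begin_ + PySem.Str.len ans - 1
    let st := sent_seg.foldl (fun (st : Int × Int × Int) w =>
        let last := if st.2.2 ≤ end_ then st.2.1 + 1 else st.2.1
        let c := st.2.2 + PySem.Str.len w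
        let first := if c ≤ begin_ then st.1 + 1 else st.1
        (first, last, c)) (0, -1, 0)
    PySem.List.pyRange st.1 (st.2.1 + 1) 1
  else
    (PySem.List.enumerate sent_seg 0).filterMap (fun iw =>
        if ans_seg.contains iw.2 then some iw.1 else none)

-- ===== PRECONDITION & SPEC =====
def Spec_get_label (sent_seg : List String) (ans_seg : List String) (out : List Int) : Prop := out = get_label_alt sent_seg ans_seg
instance (sent_seg : List String) (ans_seg : List String) (out : List Int) : Decidable (Spec_get_label sent_seg ans_seg out) := by unfold Spec_get_label; infer_instance

-- ===== CLAIM (what is proved, stated in full; the proofs are below) =====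
def Claim_equal_get_label : Prop := ∀ (sent_seg : List String) (ans_seg : List String), Dom_get_label sent_seg ans_seg → Spec_get_label sent_seg ans_seg (get_label sent_seg ans_seg)

-- ===== LEMMAS AND PROOFS =====

-- the (start, end) span table A builds, written structurally
def posList (ws : List String) (c : Int) : List (Int × Int) :=
  match ws with
  | [] => []
  | w :: t => (c, c + PySem.Str.len w - 1) :: posList t (c + PySem.Str.len w)

-- the list of indices A's second loop selects, with running index i0 and offset c
def selA (ws : List String) (b e i0 c : Int) : List Int :=
  match ws with
  | [] => []
  | w :: t => (if b ≤ c + PySem.Str.len w - 1 ∧ c ≤ e then [i0] else []) ++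
              selA t b e (i0 + 1) (c + PySem.Str.len w)

-- B's two boundary counters
def cntF (ws : List String) (c b : Int) : Int :=
  match ws with
  | [] => 0
  | w :: t => (if c + PySem.Str.len w ≤ b then 1 else 0) + cntF t (c + PySem.Str.len w) b

def cntL (ws : List String) (c e : Int) : Int :=
  match ws with
  | [] => 0
  | w :: t => (if c ≤ e then 1 else 0) + cntL t (c + PySem.Str.len w) e

def sumLen (ws : List String) : Int :=
  match ws with
  | [] => 0
  | w :: t => PySem.Str.len w + sumLen t

lemma len_nonneg (w : String) : 0 ≤ PySem.Str.len w := by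
  simp [PySem.Str.len_eq]

lemma cntF_nonneg (ws : List String) (c b : Int) : 0 ≤ cntF ws c b := by
  induction ws generalizing c with
  | nil => simp [cntF]
  | cons w t ih => simp only [cntF]; have := ih (c + PySem.Str.len w); split <;> omega

lemma cntL_nonneg (ws : List String) (c e : Int) : 0 ≤ cntL ws c e := by
  induction ws generalizing c with
  | nil => simp [cntL]
  | cons w t ih => simp only [cntL]; have := ih (c + PySem.Str.len w); split <;> omega

lemma cntF_zero (ws : List String) (c b : Int) (h : b < c) : cntF ws c b = 0 := by
  induction ws generalizing c with
  | nil => simp [cntF]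
  | cons w t ih =>
      have hl := len_nonneg w
      simp only [cntF, ih (c + PySem.Str.len w) (by omega)]
      split <;> omega

lemma cntL_zero (ws : List String) (c e : Int) (h : e < c) : cntL ws c e = 0 := by
  induction ws generalizing c with
  | nil => simp [cntL]
  | cons w t ih =>
      have hl := len_nonneg w
      simp only [cntL, ih (c + PySem.Str.len w) (by omega)]
      split <;> omega

-- main combinatorial fact: the selected indices are exactly the range between the two counters
lemma selA_eq_range (ws : List String) (b e i0 c : Int) :
    selA ws b e i0 c = PySem.List.pyRange (i0 + cntF ws c b) (i0 + cntL ws c e) 1 := by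
  induction ws generalizing i0 c with
  | nil => simp [selA, cntF, cntL, PySem.List.pyRange_one_eq_nil]
  | cons w t ih =>
      have hl := len_nonneg w
      have hF := cntF_nonneg t (c + PySem.Str.len w) b
      have hL := cntL_nonneg t (c + PySem.Str.len w) e
      simp only [selA, cntF, cntL, ih]
      by_cases h1 : c + PySem.Str.len w ≤ b
      · -- word ends strictly before the span: not selected
        simp only [if_pos h1, if_neg (show ¬(b ≤ c + PySem.Str.len w - 1 ∧ c ≤ e) by intro hc; omega),
                   List.nil_append]
        by_cases h2 : c ≤ e
        · simp only [if_pos h2]; congr 1 <;> omega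
        · have hLz := cntL_zero t (c + PySem.Str.len w) e (by omega)
          rw [if_neg h2, PySem.List.pyRange_one_eq_nil (by omega),
              PySem.List.pyRange_one_eq_nil (by omega)]
      · have hFz := cntF_zero t (c + PySem.Str.len w) b (by omega)
        simp only [if_neg h1, hFz]
        by_cases h2 : c ≤ e
        · -- selected word: it is the head of the range
          simp only [if_pos (show b ≤ c + PySem.Str.len w - 1 ∧ c ≤ e from ⟨by omega, h2⟩),
                     if_pos h2, List.singleton_append]
          rw [PySem.List.pyRange_one_cons
               (show (i0 + ((0:Int) + 0)) < i0 + (1 + cntL t (c + PySem.Str.len w) e) by omega)]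
          refine List.cons_eq_cons.mpr ⟨by omega, ?_⟩
          congr 1 <;> omega
        · have hLz := cntL_zero t (c + PySem.Str.len w) e (by omega)
          simp only [if_neg (show ¬(b ≤ c + PySem.Str.len w - 1 ∧ c ≤ e) by intro hc; exact h2 hc.2),
                     if_neg h2, hLz, List.nil_append]
          rw [PySem.List.pyRange_one_eq_nil (by omega), PySem.List.pyRange_one_eq_nil (by omega)]

-- A's pos-building fold produces posList
lemma pos_fold_eq (ws : List String) (c : Int) (acc : List (Int × Int)) :
    (ws.foldl (fun (st : Int × List (Int × Int)) w =>
        (st.1 + PySem.Str.len w, st.2 ++ [(st.1, st.1 + PySem.Str.len w - 1)])) (c, acc)).2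
    = acc ++ posList ws c := by
  induction ws generalizing c acc with
  | nil => simp [posList]
  | cons w t ih => simp only [List.foldl_cons]; rw [ih]; simp [posList]

-- A's filter loop over the span table equals selA
lemma filter_fold_eq (ws : List String) (b e i0 c : Int) (acc : List Int) :
    (PySem.List.enumerate (posList ws c) i0).foldl (fun acc ip =>
        if b ≤ ip.2.2 ∧ ip.2.1 ≤ e then acc ++ [ip.1] else acc) acc
    = acc ++ selA ws b e i0 c := by
  induction ws generalizing i0 c acc with
  | nil => simp [posList, selA]
  | cons w t ih =>
      simp only [posList, selA, PySem.List.enumerate_cons, List.foldl_cons]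
      rw [ih]
      split <;> simp

-- B's fold computes the two counters and the running total
lemma b_fold_eq (ws : List String) (b e : Int) (f l c : Int) :
    ws.foldl (fun (st : Int × Int × Int) w =>
        let last := if st.2.2 ≤ e then st.2.1 + 1 else st.2.1
        let cc := st.2.2 + PySem.Str.len w
        let first := if cc ≤ b then st.1 + 1 else st.1
        (first, last, cc)) (f, l, c)
    = (f + cntF ws c b, l + cntL ws c e, c + sumLen ws) := by
  induction ws generalizing f l c with
  | nil => simp [cntF, cntL, sumLen]
  | cons w t ih =>
      simp only [List.foldl_cons]
      rw [ih]
      simp only [cntF, cntL, sumLen, Prod.mk.injEq]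
      split_ifs <;> refine ⟨by omega, by omega, by omega⟩

-- the else branch: append-if fold = filterMap over enumerate
lemma else_branch_eq (sent_seg ans_seg : List String) :
    (PySem.List.enumerate sent_seg 0).foldl (fun acc iw =>
        if ans_seg.contains iw.2 then acc ++ [iw.1] else acc) ([] : List Int)
    = (PySem.List.enumerate sent_seg 0).filterMap (fun iw =>
        if ans_seg.contains iw.2 then some iw.1 else none) := by
  rw [PySem.List.foldl_append_if (fun iw : Int × String => ans_seg.contains iw.2) (fun iw : Int × String => iw.1)]
  simp only [List.nil_append, List.contains_eq_mem]
  -- glue: map over a filter is the corresponding filterMap (specific if-shape)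
  induction PySem.List.enumerate sent_seg 0 with
  | nil => simp
  | cons x t ih => by_cases h : x.2 ∈ ans_seg <;> simp [h, ih]

-- ===== VERDICT (by name: the statement is the Claim_ definition above) =====
theorem get_label_spec : Claim_equal_get_label := by
  intro sent_seg ans_seg _
  unfold Spec_get_label get_label get_label_alt
  by_cases h : PySem.Str.isIn (PySem.Str.join "" ans_seg) (PySem.Str.join "" sent_seg)
  · simp only [h, if_true]
    rw [pos_fold_eq, List.nil_append, filter_fold_eq, List.nil_append,
        b_fold_eq, selA_eq_range]
    norm_num
  · simp only [h]
    exact else_branch_eq sent_seg ans_seg
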